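-- pv_equiv track=rewrite | github.com/CoRe421/CECS-378 | Lab1-SymmetricCryptography.py | checkFitness
-- ===== SOURCE A (Python) =====
-- def checkFitness(cipherText, nGramDict, floorDict):
--     score = 0
--
--     #Calculates the type of ngram being used: either bi, tri, or quad.
--     lengthKey = len(list(nGramDict.keys())[0])
--
--     #Increments through the range of the cipher text, calculating all bi, tri, or quadgrams and adding their respective score to the total.
--     for i in range(len(cipherText) - (lengthKey - 1)):
--         if (cipherText[i : i + lengthKey] in nGramDict):
--             score += nGramDict[cipherText[i : i + lengthKey]]
--         else :
--             score += floorDict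
--
--     #Returns the fitness as an int.
--     return score
-- ===== SOURCE B (Python) =====
-- def checkFitness(cipherText, nGramDict, floorDict):
--     # Rolling window: keep the current n-gram and update it by dropping its
--     # first character and appending the next one, instead of slicing afresh
--     # at every index.
--     lengthKey = len(next(iter(nGramDict)))
--     window = cipherText[:lengthKey]
--     if len(window) < lengthKey:
--         return 0
--     total = nGramDict.get(window, floorDict)
--     for ch in cipherText[lengthKey:]:
--         window = window[1:] + ch
--         total += nGramDict.get(window, floorDict)
--     return total
-- ===== Notes on version B (the rewrite author's own statement) =====
-- stated objective: alternative
-- what changed: B replaces A's index loop that slices a fresh n-gram at every position by a rolling window over the remaining characters: the current gram is updated in place by dropping its first character and appending the next one, with the sum accumulated as the window slides.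
-- outside the precondition, e.g. on checkFitness('ab', {'': 5}, 7): A returns 15, B returns 19
import Mathlib
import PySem

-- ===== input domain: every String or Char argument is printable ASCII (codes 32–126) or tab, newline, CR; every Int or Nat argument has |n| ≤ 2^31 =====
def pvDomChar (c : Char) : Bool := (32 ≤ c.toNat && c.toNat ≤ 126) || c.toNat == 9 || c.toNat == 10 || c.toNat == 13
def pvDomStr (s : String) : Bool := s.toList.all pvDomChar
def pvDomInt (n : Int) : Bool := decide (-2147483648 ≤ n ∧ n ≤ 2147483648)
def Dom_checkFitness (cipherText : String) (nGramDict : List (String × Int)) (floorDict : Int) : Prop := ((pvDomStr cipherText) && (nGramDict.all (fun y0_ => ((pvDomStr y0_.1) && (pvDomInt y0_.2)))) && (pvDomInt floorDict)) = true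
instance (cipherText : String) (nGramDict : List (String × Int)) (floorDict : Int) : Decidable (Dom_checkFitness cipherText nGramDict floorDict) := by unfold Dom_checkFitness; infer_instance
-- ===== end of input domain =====

-- B slides a rolling window over the text (drop first char, append the next) instead of
-- A's fresh slice per index; equal totals, same cost class (objective: alternative).


-- ===== PORT A =====
def checkFitness (cipherText : String) (nGramDict : List (String × Int)) (floorDict : Int) : Int :=
  -- lengthKey = len(list(nGramDict.keys())[0])  (IndexError on empty dict: excluded by Pre_)
  let lengthKey : Int := PySem.Str.len (PySem.List.pyGetD (nGramDict.map (·.1)) 0 "")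
  (PySem.List.pyRange 0 (PySem.Str.len cipherText - (lengthKey - 1)) 1).foldl
    (fun score i =>
      let gram := PySem.List.slice cipherText.toList (some i) (some (i + lengthKey))
      match nGramDict.find? (fun p => p.1.toList == gram) with
      | some p => score + p.2
      | none   => score + floorDict) 0

-- ===== PORT B =====
def checkFitness_alt (cipherText : String) (nGramDict : List (String × Int)) (floorDict : Int) : Int :=
  -- lengthKey = len(next(iter(nGramDict)))  (StopIteration on empty dict: excluded by Pre_)
  let lengthKey : Int := PySem.Str.len (PySem.List.pyGetD (nGramDict.map (·.1)) 0 "")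
  -- window = cipherText[:lengthKey]
  let window := PySem.List.slice cipherText.toList none (some lengthKey)
  if (window.length : Int) < lengthKey then 0
  else
    -- total = nGramDict.get(window, floorDict)
    let total0 : Int :=
      match nGramDict.find? (fun p => p.1.toList == window) with
      | some p => p.2
      | none   => floorDict
    -- for ch in cipherText[lengthKey:]: window = window[1:] + ch; total += get(window, floor)
    ((PySem.List.slice cipherText.toList (some lengthKey) none).foldl
      (fun acc ch =>
        let w := PySem.List.slice acc.1 (some 1) none ++ [ch]
        (w, acc.2 + (match nGramDict.find? (fun p => p.1.toList == w) with
                     | some p => p.2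
                     | none   => floorDict)))
      (window, total0)).2

-- ===== PRECONDITION & SPEC =====
-- Pre_ excludes the empty dict, on which A raises IndexError, and dicts whose FIRST key is the
-- empty string — a degenerate 0-gram outside the n-gram domain, on which A scores len+1 empty
-- windows, an artefact of range(len - (-1)).
def Pre_checkFitness (cipherText : String) (nGramDict : List (String × Int)) (floorDict : Int) : Prop :=
  (nGramDict.map (·.1)).headD "" ≠ ""
instance (cipherText : String) (nGramDict : List (String × Int)) (floorDict : Int) : Decidable (Pre_checkFitness cipherText nGramDict floorDict) := by unfold Pre_checkFitness; infer_instance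
def pvWitness_checkFitness : String × (List (String × Int)) × Int := ("ababa", [("ab", 5), ("ba", 7)], -1)
def Spec_checkFitness (cipherText : String) (nGramDict : List (String × Int)) (floorDict : Int) (out : Int) : Prop := out = checkFitness_alt cipherText nGramDict floorDict
instance (cipherText : String) (nGramDict : List (String × Int)) (floorDict : Int) (out : Int) : Decidable (Spec_checkFitness cipherText nGramDict floorDict out) := by unfold Spec_checkFitness; infer_instance

-- ===== CLAIM (what is proved, stated in full; the proofs are below) =====
def Claim_equal_checkFitness : Prop := ∀ (cipherText : String) (nGramDict : List (String × Int)) (floorDict : Int), Dom_checkFitness cipherText nGramDict floorDict → Pre_checkFitness cipherText nGramDict floorDict → Spec_checkFitness cipherText nGramDict floorDict (checkFitness cipherText nGramDict floorDict)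

-- ===== LEMMAS AND PROOFS =====

-- the score of one gram: its dict value if present (first match), else the floor
def pvScore (nGramDict : List (String × Int)) (floorDict : Int) (g : List Char) : Int :=
  match nGramDict.find? (fun p => p.1.toList == g) with
  | some p => p.2
  | none   => floorDict

-- the successive length-k windows of a character list
def pvWindows (k : Nat) : List Char → List (List Char)
  | [] => []
  | c :: cs => if cs.length + 1 < k then [] else ((c :: cs).take k) :: pvWindows k cs

theorem pvWindows_nil_of_short (k : Nat) (cs : List Char) (h : cs.length < k) :
    pvWindows k cs = [] := by
  cases cs with
  | nil => rfl
  | cons c cs => simp only [pvWindows, List.length_cons] at *; simp [h]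

theorem pvWindows_cons_of_long (k : Nat) (hk : 1 ≤ k) (cs : List Char) (h : k ≤ cs.length) :
    pvWindows k cs = cs.take k :: pvWindows k cs.tail := by
  cases cs with
  | nil => simp at h; omega
  | cons c cs =>
    simp only [pvWindows, List.length_cons] at *
    have : ¬ (cs.length + 1 < k) := by omega
    simp [this]

-- (u ++ ch :: rest).tail = (u ++ [ch]).tail ++ rest
theorem pv_tail_append (u : List Char) (ch : Char) (rest : List Char) :
    (u ++ ch :: rest).tail = (u ++ [ch]).tail ++ rest := by
  cases u <;> simp

-- (cs.take k).tail ++ cs.drop k = cs.tail (for 1 ≤ k)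
theorem pv_tail_take (k : Nat) (hk : 1 ≤ k) (cs : List Char) :
    (cs.take k).tail ++ cs.drop k = cs.tail := by
  cases cs with
  | nil => simp
  | cons c cs =>
    obtain ⟨m, rfl⟩ := Nat.exists_eq_add_of_le hk
    rw [Nat.add_comm 1 m]
    simp only [List.take_succ_cons, List.drop_succ_cons, List.tail_cons]
    exact List.take_append_drop m cs

-- A's per-index slices are exactly the windows
theorem pv_mapA (k : Nat) (hk : 1 ≤ k) (cs : List Char) :
    (PySem.List.pyRange 0 ((cs.length : Int) - ((k : Int) - 1)) 1).map
      (fun i => PySem.List.slice cs (some i) (some (i + (k : Int))))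
    = pvWindows k cs := by
  induction cs with
  | nil =>
    rw [PySem.List.pyRange_one_eq_nil (by simp; omega)]
    rfl
  | cons c cs ih =>
    by_cases h : cs.length + 1 < k
    · rw [PySem.List.pyRange_one_eq_nil
        (by simp only [List.length_cons]; push_cast; omega),
        pvWindows_nil_of_short k _ (by simpa using h)]
      rfl
    · have hb : (0 : Int) < ((c :: cs).length : Int) - ((k : Int) - 1) := by
        simp only [List.length_cons]; push_cast; omega
      rw [pvWindows_cons_of_long k hk _ (by simp only [List.length_cons]; omega)]
      rw [PySem.List.pyRange_one_cons hb, List.map_cons]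
      have hhead : PySem.List.slice (c :: cs) (some 0) (some (0 + (k : Int)))
          = (c :: cs).take k := by
        rw [PySem.List.slice_zero_start, zero_add, PySem.List.slice_to_natCast]
      have hshift : PySem.List.pyRange (0 + 1) (((c :: cs).length : Int) - ((k : Int) - 1)) 1
          = (PySem.List.pyRange 0 ((cs.length : Int) - ((k : Int) - 1)) 1).map (· + 1) := by
        rw [PySem.List.pyRange_one, PySem.List.pyRange_one, List.map_map]
        have he : ((((c :: cs).length : Int) - ((k : Int) - 1)) - (0 + 1)).toNat
            = (((cs.length : Int) - ((k : Int) - 1)) - 0).toNat := by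
          simp only [List.length_cons]; omega
        rw [he]
        apply List.map_congr_left
        intro j _
        simp only [Function.comp_apply]
        ring
      have htail : (PySem.List.pyRange (0 + 1) (((c :: cs).length : Int) - ((k : Int) - 1)) 1).map
            (fun i => PySem.List.slice (c :: cs) (some i) (some (i + (k : Int))))
          = pvWindows k cs := by
        rw [hshift, List.map_map, ← ih]
        apply List.map_congr_left
        intro i hi
        have h0 : 0 ≤ i := (PySem.List.mem_pyRange_one.mp hi).1
        obtain ⟨j, rfl⟩ : ∃ j : Nat, i = (j : Int) := ⟨i.toNat, (Int.toNat_of_nonneg h0).symm⟩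
        simp only [Function.comp_apply]
        have e1 : (j : Int) + 1 = ((j + 1 : Nat) : Int) := by push_cast; ring
        have e2 : (j : Int) + 1 + (k : Int) = ((j + 1 + k : Nat) : Int) := by push_cast; ring
        have e3 : (j : Int) + (k : Int) = ((j + k : Nat) : Int) := by push_cast; ring
        rw [e2, e1, e3, PySem.List.slice_natCast, PySem.List.slice_natCast]
        simp only [List.drop_succ_cons]
        congr 1
        omega
      rw [hhead, htail, List.tail_cons]

-- B's rolling-window fold accumulates the scores of the remaining windows
theorem pv_roll (k : Nat) (hk : 1 ≤ k) (nd : List (String × Int)) (fd : Int) :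
    ∀ (rest w : List Char) (t : Int), w.length = k →
    ((rest.foldl
      (fun (acc : List Char × Int) ch =>
        let w' := PySem.List.slice acc.1 (some 1) none ++ [ch]
        (w', acc.2 + pvScore nd fd w'))
      (w, t)).2)
    = t + ((pvWindows k (w.tail ++ rest)).map (pvScore nd fd)).sum := by
  intro rest
  induction rest with
  | nil =>
    intro w t hw
    rw [List.foldl_nil, List.append_nil,
      pvWindows_nil_of_short k w.tail (by rw [List.length_tail, hw]; omega)]
    simp
  | cons ch rest ih =>
    intro w t hw
    have hw' : (w.tail ++ [ch]).length = k := by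
      simp only [List.length_append, List.length_tail, List.length_cons, List.length_nil, hw]
      omega
    have hinit : (let w' := PySem.List.slice ((w, t) : List Char × Int).1 (some 1) none ++ [ch]
        (w', (w, t).2 + pvScore nd fd w'))
        = (w.tail ++ [ch], t + pvScore nd fd (w.tail ++ [ch])) := by
      simp only [PySem.List.slice_from_one]
    rw [List.foldl_cons, hinit, ih (w.tail ++ [ch]) _ hw']
    have hlong : k ≤ (w.tail ++ ch :: rest).length := by
      simp only [List.length_append, List.length_tail, List.length_cons, hw]
      omega
    rw [pvWindows_cons_of_long k hk _ hlong]
    have htake : (w.tail ++ ch :: rest).take k = w.tail ++ [ch] := by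
      rw [show ch :: rest = [ch] ++ rest from rfl, ← List.append_assoc,
        List.take_append_of_le_length hw'.ge,
        List.take_of_length_le hw'.le]
    rw [htake]
    conv_rhs => rw [pv_tail_append]
    simp only [List.map_cons, List.sum_cons]
    ring

-- the two loop shapes agree, stated over plain character lists
theorem pv_main (k : Nat) (hk : 1 ≤ k) (cs : List Char) (nd : List (String × Int)) (fd : Int) :
    (PySem.List.pyRange 0 ((cs.length : Int) - ((k : Int) - 1)) 1).foldl
      (fun score i => score + pvScore nd fd (PySem.List.slice cs (some i) (some (i + (k : Int))))) 0
    = if ((cs.take k).length : Int) < (k : Int) then 0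
      else ((cs.drop k).foldl
        (fun (acc : List Char × Int) ch =>
          let w := PySem.List.slice acc.1 (some 1) none ++ [ch]
          (w, acc.2 + pvScore nd fd w)) (cs.take k, pvScore nd fd (cs.take k))).2 := by
  rw [PySem.List.foldl_add, zero_add,
    show (fun i => pvScore nd fd (PySem.List.slice cs (some i) (some (i + (k : Int)))))
      = pvScore nd fd ∘ (fun i => PySem.List.slice cs (some i) (some (i + (k : Int)))) from rfl,
    ← List.map_map, pv_mapA k hk]
  by_cases hlt : cs.length < k
  · have hc : ((cs.take k).length : Int) < (k : Int) := by
      rw [List.take_of_length_le (le_of_lt hlt)]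
      exact_mod_cast hlt
    rw [pvWindows_nil_of_short k cs hlt, if_pos hc]
    simp
  · have hle : k ≤ cs.length := by omega
    have hlen : (cs.take k).length = k := List.length_take_of_le hle
    rw [if_neg (by rw [hlen]; omega),
      pv_roll k hk nd fd (cs.drop k) (cs.take k) _ hlen,
      pv_tail_take k hk cs,
      pvWindows_cons_of_long k hk cs hle]
    simp only [List.map_cons, List.sum_cons]

-- ===== VERDICT (by name: the statement is the Claim_ definition above) =====
theorem checkFitness_spec : Claim_equal_checkFitness := by
  intro cipherText nGramDict floorDict _ hpre
  show checkFitness cipherText nGramDict floorDict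
      = checkFitness_alt cipherText nGramDict floorDict
  cases nGramDict with
  | nil => simp [Pre_checkFitness] at hpre
  | cons p nd =>
    have hkey : PySem.List.pyGetD ((p :: nd).map (·.1)) 0 "" = p.1 := by
      simp [pysem]
    have hp1 : p.1.toList ≠ [] := by
      intro h
      apply hpre
      simp only [Pre_checkFitness, List.map_cons, List.headD_cons] at *
      exact (String.ext h : p.1 = "")
    have hk : 1 ≤ p.1.toList.length := List.length_pos_iff.mpr hp1
    have hA : (fun (score i : Int) =>
        match (p :: nd).find? (fun q => q.1.toList ==
            PySem.List.slice cipherText.toList (some i) (some (i + (p.1.toList.length : Int)))) with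
        | some q => score + q.2
        | none   => score + floorDict)
        = (fun (score i : Int) => score + pvScore (p :: nd) floorDict
            (PySem.List.slice cipherText.toList (some i) (some (i + (p.1.toList.length : Int))))) := by
      funext s i
      unfold pvScore
      cases (p :: nd).find? (fun q => q.1.toList ==
        PySem.List.slice cipherText.toList (some i) (some (i + (p.1.toList.length : Int)))) <;> rfl
    have hB : (fun (acc : List Char × Int) (ch : Char) =>
        let w := PySem.List.slice acc.1 (some 1) none ++ [ch]
        (w, acc.2 + (match (p :: nd).find? (fun q => q.1.toList == w) with
                     | some q => q.2
                     | none   => floorDict)))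
        = (fun (acc : List Char × Int) ch =>
            let w := PySem.List.slice acc.1 (some 1) none ++ [ch]
            (w, acc.2 + pvScore (p :: nd) floorDict w)) := by
      funext acc ch
      show (PySem.List.slice acc.1 (some 1) none ++ [ch],
          acc.2 + (match (p :: nd).find? (fun q => q.1.toList ==
              (PySem.List.slice acc.1 (some 1) none ++ [ch])) with
            | some q => q.2
            | none   => floorDict))
        = (PySem.List.slice acc.1 (some 1) none ++ [ch],
          acc.2 + pvScore (p :: nd) floorDict (PySem.List.slice acc.1 (some 1) none ++ [ch]))
      unfold pvScore
      cases (p :: nd).find? (fun q => q.1.toList ==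
        (PySem.List.slice acc.1 (some 1) none ++ [ch])) <;> rfl
    have hsc : (match (p :: nd).find? (fun q => q.1.toList ==
          PySem.List.slice cipherText.toList none (some (p.1.toList.length : Int))) with
        | some q => q.2
        | none   => floorDict)
        = pvScore (p :: nd) floorDict
            (PySem.List.slice cipherText.toList none (some (p.1.toList.length : Int))) := by
      unfold pvScore
      cases (p :: nd).find? (fun q => q.1.toList ==
        PySem.List.slice cipherText.toList none (some (p.1.toList.length : Int))) <;> rfl
    simp only [checkFitness, checkFitness_alt, hkey, PySem.Str.len_eq]
    rw [hA, hB, hsc, PySem.List.slice_to_natCast, PySem.List.slice_from_natCast]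
    exact pv_main p.1.toList.length hk cipherText.toList (p :: nd) floorDict
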